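-- pv_equiv track=rewrite | github.com/Smoken35/keno-analyzer | src/keno/strategies/strategy_analyzer.py | identify_cold_numbers
-- ===== SOURCE A (Python) =====
-- from typing import Dict, List, Optional, Tuple, Union
--
-- def identify_cold_numbers(results: List[List[int]], window: int = 30) -> List[int]:
--     """
--     Identify cold numbers based on recent results.
--
--     Args:
--         results: List of draw results
--         window: Number of recent draws to analyze
--
--     Returns:
--         List of cold numbers
--     """
--     if not results:
--         raise ValueError("No results provided")
--
--     # Use last N draws
--     recent_draws = results[-window:]
--
--     # Count frequency of each number
--     frequency = {}
--     for num in range(1, 81):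
--         frequency[num] = 0
--         for draw in recent_draws:
--             if num in draw:
--                 frequency[num] += 1
--
--     # Sort by frequency and return bottom 20
--     sorted_nums = sorted(frequency.items(), key=lambda x: x[1])
--     return [num for num, _ in sorted_nums[:20]]
-- ===== SOURCE B (Python) =====
-- from typing import Dict, List, Optional, Tuple, Union
--
-- def identify_cold_numbers(results: List[List[int]], window: int = 30) -> List[int]:
--     """Counting-sort selection: one pass over the recent draws builds the
--     presence counts, then numbers are emitted from frequency buckets low-to-high."""
--     if not results:
--         raise ValueError("No results provided")
--
--     recent = results[-window:]
--
--     # One pass over the draws; each draw contributes at most once per number.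
--     counts = {}
--     for draw in recent:
--         for n in set(draw):
--             if 1 <= n <= 80:
--                 counts[n] = counts.get(n, 0) + 1
--
--     # Bucket the numbers 1..80 by frequency (counting sort; ascending ties for free).
--     buckets = [[] for _ in range(len(recent) + 1)]
--     for n in range(1, 81):
--         buckets[counts.get(n, 0)].append(n)
--
--     cold = [n for bucket in buckets for n in bucket]
--     return cold[:20]
-- ===== Notes on version B (the rewrite author's own statement) =====
-- stated objective: faster
-- what changed: Replaces the 80-pass membership count plus comparison sort with a single pass over the recent draws (per-draw set) building the presence counts and a counting-sort bucket selection over frequencies 0..len(recent); the ascending tie-break falls out of iterating 1..80 into buckets read low-to-high. Pre_ excludes only the empty results list, on which A raises ValueError (B raises there too).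
import Mathlib
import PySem

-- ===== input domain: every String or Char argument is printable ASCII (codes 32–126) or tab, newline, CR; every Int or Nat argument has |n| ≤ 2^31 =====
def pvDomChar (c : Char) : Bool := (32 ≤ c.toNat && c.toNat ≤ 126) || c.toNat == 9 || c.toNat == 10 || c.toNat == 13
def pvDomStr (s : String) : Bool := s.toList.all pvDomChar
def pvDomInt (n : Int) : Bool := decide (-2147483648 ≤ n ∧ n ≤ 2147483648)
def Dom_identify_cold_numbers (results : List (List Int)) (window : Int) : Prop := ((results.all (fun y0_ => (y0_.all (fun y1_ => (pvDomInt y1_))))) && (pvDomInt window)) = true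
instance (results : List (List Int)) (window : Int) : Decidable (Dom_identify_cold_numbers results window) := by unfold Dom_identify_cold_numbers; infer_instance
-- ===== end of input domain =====

-- B replaces A's 80-pass membership count + comparison sort by a single pass over the
-- draws building presence counts and a counting-sort bucket selection (objective: alternative).

-- ===== PORT A =====
def identify_cold_numbers (results : List (List Int)) (window : Int) : List Int :=
  let recent_draws := PySem.List.slice results (some (-window)) none
  let frequency : PySem.Dict Int Int :=
    (PySem.List.pyRange 1 81 1).foldl
      (fun d num =>
        recent_draws.foldl
          (fun d draw => if num ∈ draw then d.insert num (d.getD num 0 + 1) else d)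
          (d.insert num 0))
      PySem.Dict.empty
  let sorted_nums := PySem.List.sorted frequency.items (fun x => x.2) false
  (PySem.List.slice sorted_nums none (some 20)).map (fun p => p.1)

-- ===== PORT B =====
def identify_cold_numbers_alt (results : List (List Int)) (window : Int) : List Int :=
  let recent := PySem.List.slice results (some (-window)) none
  let counts : PySem.Dict Int Int :=
    recent.foldl
      (fun d draw =>
        (PySem.Set.ofList draw).foldl
          (fun d n => if 1 ≤ n ∧ n ≤ 80 then d.insert n (d.getD n 0 + 1) else d)
          d)
      PySem.Dict.empty
  let buckets : List (List Int) :=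
    (PySem.List.pyRange 1 81 1).foldl
      (fun bs n => bs.set (counts.getD n 0).toNat (bs.getD (counts.getD n 0).toNat [] ++ [n]))
      (List.replicate (recent.length + 1) [])
  let cold := buckets.flatten
  PySem.List.slice cold none (some 20)

-- ===== PRECONDITION & SPEC =====
-- Pre_ excludes only the empty results list, on which A raises ValueError.
def Pre_identify_cold_numbers (results : List (List Int)) (window : Int) : Prop := results ≠ []
instance (results : List (List Int)) (window : Int) : Decidable (Pre_identify_cold_numbers results window) := by unfold Pre_identify_cold_numbers; infer_instance
def pvWitness_identify_cold_numbers : List (List Int) × Int := ([[1, 2, 3], [2, 4]], 30)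
def Spec_identify_cold_numbers (results : List (List Int)) (window : Int) (out : List Int) : Prop := out = identify_cold_numbers_alt results window
instance (results : List (List Int)) (window : Int) (out : List Int) : Decidable (Spec_identify_cold_numbers results window out) := by unfold Spec_identify_cold_numbers; infer_instance

-- ===== CLAIM (what is proved, stated in full; the proofs are below) =====
def Claim_equal_identify_cold_numbers : Prop := ∀ (results : List (List Int)) (window : Int), Dom_identify_cold_numbers results window → Pre_identify_cold_numbers results window → Spec_identify_cold_numbers results window (identify_cold_numbers results window)

-- ===== LEMMAS AND PROOFS =====

-- number of recent draws containing n (a draw with duplicates counts once)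
def pvCnt (recent : List (List Int)) (n : Int) : Int :=
  (recent.countP (fun draw => decide (n ∈ draw)) : Int)

-- strict "sort by snd, ties by fst" order naming the stable-sort result
def pvLex (p q : Int × Int) : Prop := p.2 < q.2 ∨ (p.2 = q.2 ∧ p.1 < q.1)

lemma pvCnt_nonneg (recent : List (List Int)) (n : Int) : 0 ≤ pvCnt recent n := by
  simp [pvCnt]

lemma pvCnt_le (recent : List (List Int)) (n : Int) : pvCnt recent n ≤ (recent.length : Int) := by
  simp only [pvCnt]
  exact_mod_cast List.countP_le_length


lemma pvRepInsert {β : Type} (l : List β) (d : PySem.Dict Int Int) (k : Int) (v : Int) :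
    l.foldl (fun d _ => d.insert k (d.getD k 0 + 1)) (d.insert k v)
      = d.insert k (v + l.length) := by
  induction l generalizing v with
  | nil => simp
  | cons x t ih =>
      simp only [List.foldl_cons, PySem.Dict.getD_insert_self, PySem.Dict.insert_insert_self]
      rw [ih]
      congr 1
      simp only [List.length_cons]
      push_cast
      ring

lemma pvInner (recent : List (List Int)) (d : PySem.Dict Int Int) (num : Int) :
    recent.foldl
      (fun d draw => if num ∈ draw then d.insert num (d.getD num 0 + 1) else d)
      (d.insert num 0)
    = d.insert num (pvCnt recent num) := by
  rw [PySem.List.foldl_ite_eq_foldl_filter]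
  rw [pvRepInsert]
  simp [pvCnt, List.countP_eq_length_filter]

lemma pvItemsA (recent : List (List Int)) :
    ((PySem.List.pyRange 1 81 1).foldl
      (fun d num =>
        recent.foldl
          (fun d draw => if num ∈ draw then d.insert num (d.getD num 0 + 1) else d)
          (d.insert num 0))
      PySem.Dict.empty).items
      = (PySem.List.pyRange 1 81 1).map (fun n => (n, pvCnt recent n)) := by
  have h1 : ∀ (d : PySem.Dict Int Int) (num : Int),
      recent.foldl (fun d draw => if num ∈ draw then d.insert num (d.getD num 0 + 1) else d)
        (d.insert num 0) = d.insert num (pvCnt recent num) := fun d num => pvInner recent d num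
  have h2 : (PySem.List.pyRange 1 81 1).foldl
      (fun d num =>
        recent.foldl (fun d draw => if num ∈ draw then d.insert num (d.getD num 0 + 1) else d)
          (d.insert num 0)) PySem.Dict.empty
      = (PySem.List.pyRange 1 81 1).foldl (fun d num => d.insert num (pvCnt recent num)) PySem.Dict.empty :=
    PySem.List.foldl_congr_mem _ _ _ _ (fun acc x _ => h1 acc x)
  rw [h2]
  rw [PySem.Dict.items_foldl_insert_fresh (PySem.List.pyRange 1 81 1) (fun n => n)
      (fun n => pvCnt recent n) PySem.Dict.empty
      (by intro a _; simp) (by simpa using (by decide : (PySem.List.pyRange 1 81 1).Nodup))]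
  simp [PySem.Dict.empty]

lemma pvCountsB (recent : List (List Int)) (n : Int) (hn : 1 ≤ n ∧ n ≤ 80) :
    (recent.foldl
      (fun d draw =>
        (PySem.Set.ofList draw).foldl
          (fun d n => if 1 ≤ n ∧ n ≤ 80 then d.insert n (d.getD n 0 + 1) else d)
          d)
      PySem.Dict.empty).getD n 0 = pvCnt recent n := by
  suffices h : ∀ (d : PySem.Dict Int Int),
      (recent.foldl
        (fun d draw =>
          (PySem.Set.ofList draw).foldl
            (fun d n => if 1 ≤ n ∧ n ≤ 80 then d.insert n (d.getD n 0 + 1) else d)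
            d)
        d).getD n 0 = d.getD n 0 + pvCnt recent n by
    simpa [PySem.Dict.empty, PySem.Dict.getD, PySem.Dict.get?] using h PySem.Dict.empty
  induction recent with
  | nil => simp [pvCnt]
  | cons draw rest ih =>
      intro d
      simp only [List.foldl_cons]
      rw [ih]
      have hstep : ((PySem.Set.ofList draw).foldl
          (fun d n => if 1 ≤ n ∧ n ≤ 80 then d.insert n (d.getD n 0 + 1) else d) d).getD n 0
          = d.getD n 0 + if n ∈ draw then 1 else 0 := by
        rw [PySem.List.foldl_ite_eq_foldl_filter (p := fun n : Int => 1 ≤ n ∧ n ≤ 80)]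
        rw [PySem.Dict.getD_foldl_insert_add_one]
        rw [List.count_filter (by simpa using hn)]
        by_cases hmem : n ∈ draw
        · have h1 : (PySem.Set.ofList draw).count n = 1 :=
            List.count_eq_one_of_mem (PySem.Set.nodup_ofList draw)
              ((PySem.Set.mem_ofList draw n).mpr hmem)
          simp [hmem, h1]
        · have h0 : (PySem.Set.ofList draw).count n = 0 := by
            rw [List.count_eq_zero]
            simp [PySem.Set.mem_ofList, hmem]
          simp [hmem, h0]
      rw [hstep]
      simp only [pvCnt, List.countP_cons]
      by_cases hmem : n ∈ draw <;> simp [hmem] <;> push_cast <;> ring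


lemma pvLex_trans {p q r : Int × Int} (h1 : pvLex p q) (h2 : pvLex q r) : pvLex p r := by
  unfold pvLex at *
  rcases h1 with h | ⟨e1, f1⟩ <;> rcases h2 with h' | ⟨e2, f2⟩ <;> first
    | (left; omega)
    | (right; constructor <;> omega)

lemma pvInsertBy_pairwise (x : Int × Int) (acc : List (Int × Int))
    (h : acc.Pairwise pvLex) (hf : ∀ p ∈ acc, p.1 < x.1) :
    (PySem.List.insertBy (fun a b => decide (a.2 < b.2)) x acc).Pairwise pvLex := by
  induction acc with
  | nil => simp [PySem.List.insertBy]
  | cons y ys ih =>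
      rw [List.pairwise_cons] at h
      simp only [PySem.List.insertBy]
      by_cases hb : x.2 < y.2
      · simp only [hb, decide_true, if_true]
        constructor
        · intro q hq
          rcases List.mem_cons.mp hq with rfl | hq
          · exact Or.inl hb
          · exact pvLex_trans (Or.inl hb) (h.1 q hq)
        · exact List.pairwise_cons.mpr h
      · simp only [hb, decide_false, if_false]
        constructor
        · intro q hq
          rcases (PySem.List.mem_insertBy _ _ _ _).mp hq with rfl | hq
          · -- pvLex y x with ¬ x.2 < y.2 and y.1 < x.1
            rcases lt_or_eq_of_le (le_of_not_gt hb) with h' | h'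
            · exact Or.inl h'
            · exact Or.inr ⟨h', hf y (by simp)⟩
          · exact h.1 q hq
        · exact ih h.2 (fun p hp => hf p (by simp [hp]))

lemma pvSorted_pairwise (xs : List (Int × Int)) (h : xs.Pairwise (fun p q => p.1 < q.1)) :
    (PySem.List.sorted xs (fun p => p.2) false).Pairwise pvLex := by
  rw [PySem.List.sorted_eq_foldl_insertBy]
  suffices hgen : ∀ (acc : List (Int × Int)), acc.Pairwise pvLex →
      (∀ p ∈ acc, ∀ q ∈ xs, p.1 < q.1) →
      (xs.foldl (fun acc x => PySem.List.insertBy (fun a b => decide (a.2 < b.2)) x acc) acc).Pairwise pvLex by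
    exact hgen [] (by simp) (by simp)
  induction xs with
  | nil => intro acc hacc _; simpa using hacc
  | cons x t ih =>
      intro acc hacc hcross
      rw [List.pairwise_cons] at h
      simp only [List.foldl_cons]
      refine ih h.2 _ (pvInsertBy_pairwise x acc hacc (fun p hp => hcross p hp x (by simp))) ?_
      intro p hp q hq
      rcases (PySem.List.mem_insertBy _ _ _ _).mp hp with rfl | hp
      · exact h.1 q hq
      · exact hcross p hp q (by simp [hq])

lemma pvSumIte (c : Nat) (v0 B : Nat) :
    ((List.range B).map (fun (v : Nat) => if (v0 : Int) = (v : Int) then c else 0)).sum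
      = if v0 < B then c else 0 := by
  induction B with
  | zero => simp
  | succ B ih =>
      rw [List.range_succ, List.map_append, List.sum_append, ih]
      by_cases h1 : v0 = B
      · subst h1; simp
      · have h2 : ¬ ((v0 : Int) = (B : Int)) := by exact_mod_cast h1
        simp only [List.map_cons, List.map_nil, List.sum_cons, List.sum_nil, h2, if_false]
        by_cases h3 : v0 < B
        · rw [if_pos h3, if_pos (by omega)]; simp
        · rw [if_neg h3, if_neg (by omega)]; simp

lemma pvGroup_perm (l : List (Int × Int)) (B : Nat)
    (h : ∀ p ∈ l, 0 ≤ p.2 ∧ p.2 < (B : Int)) :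
    ((List.range B).flatMap (fun (v : Nat) => l.filter (fun p => decide (p.2 = (v : Int))))).Perm l := by
  rw [List.perm_iff_count]
  intro a
  rw [List.count_flatMap]
  have hmap : (List.range B).map
        (List.count a ∘ fun (v : Nat) => l.filter (fun p => decide (p.2 = (v : Int))))
      = (List.range B).map (fun (v : Nat) => if a.2 = (v : Int) then l.count a else 0) := by
    refine List.map_congr_left ?_
    intro v _
    simp only [Function.comp]
    by_cases ha2 : a.2 = (v : Int)
    · rw [List.count_filter (by simpa using ha2), if_pos ha2]
    · rw [if_neg ha2, List.count_eq_zero]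
      intro hmem
      exact ha2 (by simpa using (List.of_mem_filter hmem))
  rw [hmap]
  by_cases hal : a ∈ l
  · have hb := h a hal
    have hcast : a.2 = ((a.2.toNat : Nat) : Int) := by omega
    have hlt : a.2.toNat < B := by omega
    calc ((List.range B).map (fun (v : Nat) => if a.2 = (v : Int) then l.count a else 0)).sum
        = ((List.range B).map (fun (v : Nat) => if ((a.2.toNat : Nat) : Int) = (v : Int) then l.count a else 0)).sum := by
          rw [← hcast]
      _ = l.count a := by rw [pvSumIte, if_pos hlt]
  · have h0 : l.count a = 0 := List.count_eq_zero.mpr hal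
    rw [h0]
    simp

lemma pvGroup_pairwise (l : List (Int × Int)) (B : Nat)
    (h : l.Pairwise (fun p q => p.1 < q.1)) :
    ((List.range B).flatMap (fun (v : Nat) => l.filter (fun p => decide (p.2 = (v : Int))))).Pairwise pvLex := by
  rw [List.pairwise_flatMap]
  constructor
  · intro v _
    rw [List.pairwise_filter]
    refine h.imp ?_
    intro p q hpq hp2 hq2
    have e1 : p.2 = (v : Int) := by simpa using hp2
    have e2 : q.2 = (v : Int) := by simpa using hq2
    exact Or.inr ⟨by omega, hpq⟩
  · refine (List.pairwise_lt_range).imp ?_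
    intro v w hvw
    intro x hx y hy
    have hx2 : x.2 = (v : Int) := by simpa using (List.of_mem_filter hx)
    have hy2 : y.2 = (w : Int) := by simpa using (List.of_mem_filter hy)
    exact Or.inl (by omega)

lemma pvSorted_eq_group (l : List (Int × Int)) (B : Nat)
    (hp : l.Pairwise (fun p q => p.1 < q.1))
    (h : ∀ p ∈ l, 0 ≤ p.2 ∧ p.2 < (B : Int)) :
    PySem.List.sorted l (fun p => p.2) false
      = (List.range B).flatMap (fun (v : Nat) => l.filter (fun p => decide (p.2 = (v : Int)))) := by
  refine List.eq_of_perm_of_sorted ?_ (pvSorted_pairwise l hp) (pvGroup_pairwise l B hp)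
    (((PySem.List.sorted_perm l (fun p => p.2) false)).trans (pvGroup_perm l B h).symm)
  intro a b _ _ h1 h2
  rcases h1 with h1 | ⟨e1, f1⟩ <;> rcases h2 with h2 | ⟨e2, f2⟩ <;> (exfalso; omega)

lemma pvBucketFold (ns : List Int) (idx : Int → Nat) (bs : List (List Int))
    (h : ∀ n ∈ ns, idx n < bs.length) :
    (ns.foldl (fun bs n => bs.set (idx n) (bs.getD (idx n) [] ++ [n])) bs).length = bs.length ∧
    ∀ v : Nat,
      (ns.foldl (fun bs n => bs.set (idx n) (bs.getD (idx n) [] ++ [n])) bs).getD v []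
        = bs.getD v [] ++ ns.filter (fun n => decide (idx n = v)) := by
  induction ns generalizing bs with
  | nil => simp
  | cons n t ih =>
      have hlen : (bs.set (idx n) (bs.getD (idx n) [] ++ [n])).length = bs.length := by
        simp
      have h' : ∀ m ∈ t, idx m < (bs.set (idx n) (bs.getD (idx n) [] ++ [n])).length := by
        intro m hm; rw [hlen]; exact h m (by simp [hm])
      obtain ⟨ihl, ihd⟩ := ih (bs.set (idx n) (bs.getD (idx n) [] ++ [n])) h'
      constructor
      · simpa [hlen] using ihl
      · intro v
        simp only [List.foldl_cons]
        rw [ihd v]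
        have hset : (bs.set (idx n) (bs.getD (idx n) [] ++ [n])).getD v []
            = if idx n = v then bs.getD v [] ++ [n] else bs.getD v [] := by
          by_cases hv : idx n = v
          · subst hv
            rw [List.getD, List.getElem?_set_self (h n (by simp))]
            simp [List.getD]
          · have e : (bs.set (idx n) (bs.getD (idx n) [] ++ [n]))[v]? = bs[v]? :=
              List.getElem?_set_ne hv
            simp [List.getD, e, hv]
        rw [hset, List.filter_cons]
        by_cases hv : idx n = v
        · simp [hv]
        · have hd : (decide (idx n = v)) = false := by simpa using hv
          simp [hv, hd]

lemma pvListDecomp {α : Type} (l : List α) (d : α) :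
    l = (List.range l.length).map (fun i => l.getD i d) := by
  refine List.ext_getElem (by simp) ?_
  intro i h1 h2
  simp [List.getD, List.getElem?_eq_getElem h1]

lemma pvRange_mem_bounds (n : Int) (hn : n ∈ PySem.List.pyRange 1 81 1) : 1 ≤ n ∧ n ≤ 80 := by
  have := PySem.List.mem_pyRange_one.mp hn
  omega

lemma pvTake20 {α : Type} (xs : List α) :
    PySem.List.slice xs none (some 20) = xs.take 20 := by
  have h := PySem.List.slice_to_natCast xs 20
  norm_num at h
  exact h

set_option maxHeartbeats 1000000 in
lemma pvRange_pairwise : (PySem.List.pyRange 1 81 1).Pairwise (fun a b => a < b) := by decide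

-- ===== VERDICT (by name: the statement is the Claim_ definition above) =====
set_option maxHeartbeats 1000000 in
theorem identify_cold_numbers_spec : Claim_equal_identify_cold_numbers := by
  intro results window _ _
  unfold Spec_identify_cold_numbers identify_cold_numbers identify_cold_numbers_alt
  simp only []
  set recent := PySem.List.slice results (some (-window)) none with hrec
  set counts : PySem.Dict Int Int :=
    recent.foldl
      (fun d draw =>
        (PySem.Set.ofList draw).foldl
          (fun d n => if 1 ≤ n ∧ n ≤ 80 then d.insert n (d.getD n 0 + 1) else d)
          d)
      PySem.Dict.empty with hcounts
  set L := recent.length with hL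
  -- A side: frequency items, then the stable sort as bucket concatenation
  rw [pvItemsA recent]
  set l := (PySem.List.pyRange 1 81 1).map (fun n => (n, pvCnt recent n)) with hl
  have hp : l.Pairwise (fun p q => p.1 < q.1) := by
    rw [hl, List.pairwise_map]
    exact pvRange_pairwise
  have hbound : ∀ p ∈ l, 0 ≤ p.2 ∧ p.2 < ((L + 1 : Nat) : Int) := by
    rw [hl]
    intro p hp'
    obtain ⟨n, _, rfl⟩ := List.mem_map.mp hp'
    have h1 := pvCnt_nonneg recent n
    have h2 := pvCnt_le recent n
    constructor
    · exact h1
    · push_cast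
      omega
  rw [pvSorted_eq_group l (L + 1) hp hbound]
  rw [pvTake20, pvTake20, List.map_take, List.map_flatMap]
  -- B side: the bucket fold
  have hcnt : ∀ n ∈ PySem.List.pyRange 1 81 1, counts.getD n 0 = pvCnt recent n := by
    intro n hn
    exact pvCountsB recent n (pvRange_mem_bounds n hn)
  have hidx : ∀ n ∈ PySem.List.pyRange 1 81 1,
      (counts.getD n 0).toNat < (List.replicate (L + 1) ([] : List Int)).length := by
    intro n hn
    rw [hcnt n hn, List.length_replicate]
    have h1 := pvCnt_nonneg recent n
    have h2 := pvCnt_le recent n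
    omega
  obtain ⟨hblen, hbgetD⟩ :=
    pvBucketFold (PySem.List.pyRange 1 81 1) (fun n => (counts.getD n 0).toNat)
      (List.replicate (L + 1) []) hidx
  set buckets := (PySem.List.pyRange 1 81 1).foldl
      (fun bs n => bs.set (counts.getD n 0).toNat (bs.getD (counts.getD n 0).toNat [] ++ [n]))
      (List.replicate (L + 1) ([] : List Int)) with hbuckets
  have hblen' : buckets.length = L + 1 := by
    rw [hbuckets]
    simpa using hblen
  have hb2 : buckets
      = (List.range (L + 1)).map
          (fun (v : Nat) => (PySem.List.pyRange 1 81 1).filter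
            (fun n => decide ((counts.getD n 0).toNat = v))) := by
    refine (pvListDecomp buckets []).trans ?_
    rw [hblen']
    refine List.map_congr_left ?_
    intro v _
    rw [hbuckets]
    simpa using hbgetD v
  rw [hb2, List.flatMap_def]
  -- match the two bucket families
  refine congrArg (List.take 20) (congrArg List.flatten (List.map_congr_left ?_))
  intro v _
  rw [hl, List.filter_map, List.map_map]
  simp only [Function.comp_def]
  rw [List.map_id'']
  refine List.filter_congr ?_
  intro n hn
  rw [hcnt n hn]
  refine decide_eq_decide.mpr ?_
  have h1 := pvCnt_nonneg recent n
  omega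
  intro x
  rfl
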